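-- pv_equiv track=rewrite | github.com/AminArshadi/Python-Codes | ITI/a3_300189176/a3_part2_300189176.py | countMembers
-- ===== SOURCE A (Python) =====
-- def countMembers(s):
--     '''(str)->int
--     The funtion counts how many times the characters the lower case letter between e and j
--     (inclusive), the upper case letters between F and X (inclusive), numerals between 2 and 6 (inclusive), and
--     the exclamation point (!), comma (,), and backslash (\) are used in s.'''
--
--     n = 0
--     result = 0
--     a = 'FGHIJKLMNOPQRSTUVWXefghij23456!,\\'
--     while len(s)-1 >= n:
--         if s[n] in a:
--             n = n + 1
--             result = result +1
--
--         else: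
--             n = n + 1
--
--     return result
-- ===== SOURCE B (Python) =====
-- def countMembers(s):
--     a = 'FGHIJKLMNOPQRSTUVWXefghij23456!,\\'
--     freq = {}
--     for ch in s:
--         freq[ch] = freq.get(ch, 0) + 1
--     return sum(freq.get(ch, 0) for ch in a)
-- ===== Notes on version B (the rewrite author's own statement) =====
-- stated objective: faster
-- what changed: B builds a frequency table of s in one pass and then sums the counts of the 33 allowed characters (loop over the fixed alphabet), instead of A's index-driven while loop over s with a per-character membership test in the 33-char string.
import Mathlib
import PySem

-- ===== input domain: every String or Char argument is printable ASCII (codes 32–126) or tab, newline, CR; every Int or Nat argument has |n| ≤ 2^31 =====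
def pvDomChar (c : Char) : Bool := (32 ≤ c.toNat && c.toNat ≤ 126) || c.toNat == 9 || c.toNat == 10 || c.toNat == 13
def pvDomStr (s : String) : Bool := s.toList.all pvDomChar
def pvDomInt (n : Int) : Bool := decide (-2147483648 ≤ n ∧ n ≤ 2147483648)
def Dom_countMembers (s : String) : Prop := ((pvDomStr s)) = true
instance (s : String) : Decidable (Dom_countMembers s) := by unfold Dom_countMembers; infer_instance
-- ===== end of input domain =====

-- B replaces A's while loop with a membership test per character by a one-pass frequency
-- table summed over the fixed allowed alphabet (idiomatic; same result).

-- ===== PORT A =====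
def pvAllowed : String := "FGHIJKLMNOPQRSTUVWXefghij23456!,\\"

-- the while loop of A: walks the remaining characters of s, counting members.
-- Python's single-character `c in a` is membership of c among a's characters (ported by hand; exact for one-char needles).
def countMembersLoop : List Char → Int → Int
  | [], result => result
  | c :: rest, result =>
      if pvAllowed.toList.contains c then countMembersLoop rest (result + 1)
      else countMembersLoop rest result

def countMembers (s : String) : Int := countMembersLoop s.toList 0

-- ===== PORT B =====
def countMembers_alt (s : String) : Int :=
  let freq : PySem.Dict Char Int := PySem.Dict.counter s.toList
  pvAllowed.toList.foldl (fun acc ch => acc + freq.getD ch 0) 0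

-- ===== PRECONDITION & SPEC =====
def Spec_countMembers (s : String) (out : Int) : Prop := out = countMembers_alt s
instance (s : String) (out : Int) : Decidable (Spec_countMembers s out) := by unfold Spec_countMembers; infer_instance

-- ===== CLAIM (what is proved, stated in full; the proofs are below) =====
def Claim_equal_countMembers : Prop := ∀ (s : String), Dom_countMembers s → Spec_countMembers s (countMembers s)

-- ===== LEMMAS AND PROOFS =====

theorem countMembersLoop_eq (l : List Char) (r : Int) :
    countMembersLoop l r = r + (l.countP (fun c => pvAllowed.toList.contains c) : Int) := by
  induction l generalizing r with
  | nil => simp [countMembersLoop]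
  | cons c t ih =>
      simp only [countMembersLoop, List.countP_cons]
      split_ifs with h <;> simp [ih, add_comm, add_assoc]

-- sum over a duplicate-free alphabet of the indicator 'ch == c' is the indicator 'c in alphabet'
theorem sum_indicator (c : Char) : ∀ (A : List Char), A.Nodup →
    (A.map (fun ch => ((if c == ch then 1 else 0 : Nat) : Int))).sum
      = (if A.contains c then 1 else 0 : Int) := by
  intro A
  induction A with
  | nil => simp
  | cons a as ih =>
      intro hA
      have has : as.Nodup := hA.of_cons
      have hna : a ∉ as := (List.nodup_cons.mp hA).1
      have h2 := ih has
      by_cases hca : c = a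
      · subst hca
        simp [hna] at h2
        simp [h2, hna]
      · simp [hca] at h2 ⊢
        simp [h2]

-- counting members of a duplicate-free alphabet in l = summing, over the alphabet, l's count of each letter
theorem countP_mem_eq_sum_count (A : List Char) (hA : A.Nodup) (l : List Char) :
    (l.countP (fun c => A.contains c) : Int) = (A.map (fun ch => (l.count ch : Int))).sum := by
  induction l with
  | nil => simp
  | cons c t ih =>
      simp only [List.countP_cons, List.count_cons]
      have hsplit : (A.map (fun ch => ((t.count ch + if c == ch then 1 else 0 : Nat) : Int))).sum
          = (A.map (fun ch => (t.count ch : Int))).sum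
            + (A.map (fun ch => ((if c == ch then 1 else 0 : Nat) : Int))).sum := by
        rw [← List.sum_map_add]
        congr 1
      rw [hsplit, sum_indicator c A hA, ← ih]
      push_cast
      ring

theorem countMembers_spec' (s : String) : countMembers s = countMembers_alt s := by
  have hnd : pvAllowed.toList.Nodup := by decide
  simp only [countMembers, countMembers_alt, countMembersLoop_eq, zero_add,
    PySem.List.foldl_add, PySem.Dict.getD_counter]
  exact countP_mem_eq_sum_count _ hnd _

-- ===== VERDICT (by name: the statement is the Claim_ definition above) =====
theorem countMembers_spec : Claim_equal_countMembers := by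
  intro s _
  exact countMembers_spec' s
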